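-- pv_equiv track=rewrite | github.com/mjcross/AdventOfCode | utils/iterate2d.py | iterate2d
-- ===== SOURCE A (Python) =====
-- def iterate2d(x_start, y_start, x_end, y_end):
--     dx = min(1, max(-1, x_end - x_start))
--     dy = min(1, max(-1, y_end - y_start))
--     x, y = x_start, y_start
--     yield x, y
--     while x != x_end or y!= y_end:
--         if x != x_end:
--             x += dx
--         if y != y_end:
--             y += dy
--         yield x, y
-- ===== SOURCE B (Python) =====
-- def iterate2d(x_start, y_start, x_end, y_end):
--     dx = (x_end > x_start) - (x_end < x_start)
--     dy = (y_end > y_start) - (y_end < y_start)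
--     ax = abs(x_end - x_start)
--     ay = abs(y_end - y_start)
--     for i in range(max(ax, ay) + 1):
--         yield (x_start + dx * min(i, ax), y_start + dy * min(i, ay))
-- ===== Notes on version B (the rewrite author's own statement) =====
-- stated objective: simpler
-- what changed: B computes each point directly from its index with a sign/min-clamp closed form over range(max(|dx|,|dy|)+1), instead of A's while loop maintaining a running (x,y) state with per-axis conditionals.
import Mathlib
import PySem

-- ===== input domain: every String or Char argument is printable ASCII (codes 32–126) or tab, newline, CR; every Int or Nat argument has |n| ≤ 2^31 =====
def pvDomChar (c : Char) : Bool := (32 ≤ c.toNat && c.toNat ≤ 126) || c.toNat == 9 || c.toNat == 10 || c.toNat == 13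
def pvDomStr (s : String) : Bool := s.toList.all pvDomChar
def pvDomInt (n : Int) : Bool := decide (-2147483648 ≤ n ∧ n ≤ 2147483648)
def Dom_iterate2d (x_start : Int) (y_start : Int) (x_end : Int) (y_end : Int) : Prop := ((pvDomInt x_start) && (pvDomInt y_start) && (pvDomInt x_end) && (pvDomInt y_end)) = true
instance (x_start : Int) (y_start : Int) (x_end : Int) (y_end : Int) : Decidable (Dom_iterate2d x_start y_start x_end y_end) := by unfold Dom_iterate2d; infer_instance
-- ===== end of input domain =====

-- B replaces A's stateful while loop by a closed-form point-per-index formula (simpler; same cost).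

-- ===== PORT A =====
-- A's while loop; the fuel is exactly the number of iterations the loop performs
-- (max of the two axis distances), so the loop body is a step-for-step transcription.
def iterate2dLoop (xe ye dx dy : Int) : Nat → Int → Int → List (Int × Int)
  | 0, _, _ => []
  | n + 1, x, y =>
    if x ≠ xe ∨ y ≠ ye then
      let x' := if x ≠ xe then x + dx else x
      let y' := if y ≠ ye then y + dy else y
      (x', y') :: iterate2dLoop xe ye dx dy n x' y'
    else []

def iterate2d (x_start : Int) (y_start : Int) (x_end : Int) (y_end : Int) : List (Int × Int) :=
  let dx := min 1 (max (-1) (x_end - x_start))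
  let dy := min 1 (max (-1) (y_end - y_start))
  (x_start, y_start) ::
    iterate2dLoop x_end y_end dx dy
      (max (x_end - x_start).natAbs (y_end - y_start).natAbs) x_start y_start

-- ===== PORT B =====
def iterate2d_alt (x_start : Int) (y_start : Int) (x_end : Int) (y_end : Int) : List (Int × Int) :=
  let dx : Int := if x_end > x_start then 1 else if x_end < x_start then -1 else 0
  let dy : Int := if y_end > y_start then 1 else if y_end < y_start then -1 else 0
  let ax : Int := |x_end - x_start|
  let ay : Int := |y_end - y_start|
  (PySem.List.pyRange 0 (max ax ay + 1) 1).map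
    (fun i => (x_start + dx * min i ax, y_start + dy * min i ay))

-- ===== PRECONDITION & SPEC =====
def Spec_iterate2d (x_start : Int) (y_start : Int) (x_end : Int) (y_end : Int) (out : List (Int × Int)) : Prop := out = iterate2d_alt x_start y_start x_end y_end
instance (x_start : Int) (y_start : Int) (x_end : Int) (y_end : Int) (out : List (Int × Int)) : Decidable (Spec_iterate2d x_start y_start x_end y_end out) := by unfold Spec_iterate2d; infer_instance

-- ===== CLAIM (what is proved, stated in full; the proofs are below) =====
def Claim_equal_iterate2d : Prop := ∀ (x_start : Int) (y_start : Int) (x_end : Int) (y_end : Int), Dom_iterate2d x_start y_start x_end y_end → Spec_iterate2d x_start y_start x_end y_end (iterate2d x_start y_start x_end y_end)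

-- ===== LEMMAS AND PROOFS =====

-- A's loop, run from the closed-form point of index i, produces the closed-form points
-- of the remaining indices.  ax/ay abstract the axis distances; hdx/hdy pin dx/dy to
-- the sign values so every arithmetic fact is linear.
theorem pvLoop_eq_map (xs ys xe ye dx dy ax ay : Int)
    (hax : 0 ≤ ax) (hay : 0 ≤ ay)
    (hxe : xe = xs + dx * ax) (hye : ye = ys + dy * ay)
    (hdx : dx = 1 ∨ dx = -1 ∨ (dx = 0 ∧ ax = 0))
    (hdy : dy = 1 ∨ dy = -1 ∨ (dy = 0 ∧ ay = 0)) :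
    ∀ (m i : Nat), (i : Int) + m = max ax ay →
      iterate2dLoop xe ye dx dy m (xs + dx * min (i : Int) ax) (ys + dy * min (i : Int) ay) =
        (PySem.List.pyRange ((i : Int) + 1) ((i : Int) + 1 + m) 1).map
          (fun j => (xs + dx * min j ax, ys + dy * min j ay)) := by
  intro m
  induction m with
  | zero =>
    intro i hi
    rw [iterate2dLoop, PySem.List.pyRange_one_eq_nil (by push_cast; omega), List.map_nil]
  | succ n ih =>
    intro i hi
    push_cast at hi
    have hcond : xs + dx * min (i : Int) ax ≠ xe ∨ ys + dy * min (i : Int) ay ≠ ye := by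
      rw [hxe, hye]
      rcases hdx with h | h | ⟨h, h0⟩ <;> rcases hdy with h' | h' | ⟨h', h0'⟩ <;>
        subst h <;> subst h' <;> omega
    have hx' : (if xs + dx * min (i : Int) ax ≠ xe then xs + dx * min (i : Int) ax + dx
        else xs + dx * min (i : Int) ax) = xs + dx * min ((i : Int) + 1) ax := by
      subst hxe
      rcases hdx with h | h | ⟨h, h0⟩ <;> subst h <;> split_ifs <;> omega
    have hy' : (if ys + dy * min (i : Int) ay ≠ ye then ys + dy * min (i : Int) ay + dy
        else ys + dy * min (i : Int) ay) = ys + dy * min ((i : Int) + 1) ay := by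
      subst hye
      rcases hdy with h | h | ⟨h, h0⟩ <;> subst h <;> split_ifs <;> omega
    rw [iterate2dLoop, if_pos hcond]
    simp only [hx', hy']
    have hrec := ih (i + 1) (by push_cast; omega)
    push_cast at hrec
    rw [hrec]
    conv_rhs => rw [PySem.List.pyRange_one_cons (by push_cast; omega)]
    rw [List.map_cons]
    congr 3
    push_cast
    ring

theorem iterate2d_eq_alt (xs ys xe ye : Int) : iterate2d xs ys xe ye = iterate2d_alt xs ys xe ye := by
  unfold iterate2d iterate2d_alt
  have hdx : min 1 (max (-1) (xe - xs)) = if xe > xs then 1 else if xe < xs then -1 else 0 := by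
    simp only [min_def, max_def]; split_ifs <;> omega
  have hdy : min 1 (max (-1) (ye - ys)) = if ye > ys then 1 else if ye < ys then -1 else 0 := by
    simp only [min_def, max_def]; split_ifs <;> omega
  simp only [hdx, hdy, Int.abs_eq_natAbs]
  set dx : Int := if xe > xs then 1 else if xe < xs then -1 else 0 with hdxdef
  set dy : Int := if ye > ys then 1 else if ye < ys then -1 else 0 with hdydef
  have h0 := pvLoop_eq_map xs ys xe ye dx dy ((xe - xs).natAbs : Int) ((ye - ys).natAbs : Int)
    (by positivity) (by positivity)
    (by rw [hdxdef]; split_ifs <;> omega)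
    (by rw [hdydef]; split_ifs <;> omega)
    (by rw [hdxdef]; split_ifs <;> omega)
    (by rw [hdydef]; split_ifs <;> omega)
    (max (xe - xs).natAbs (ye - ys).natAbs) 0 (by push_cast; omega)
  rw [show (min (((0:ℕ):Int)) ((xe - xs).natAbs : Int)) = 0 by omega,
      show (min (((0:ℕ):Int)) ((ye - ys).natAbs : Int)) = 0 by omega,
      mul_zero, mul_zero, add_zero, add_zero] at h0
  conv_rhs => rw [PySem.List.pyRange_one_cons (a := 0) (by positivity)]
  rw [List.map_cons]
  congr 1
  · rw [show (min (0:Int) ((xe - xs).natAbs : Int)) = 0 by omega,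
        show (min (0:Int) ((ye - ys).natAbs : Int)) = 0 by omega]
    norm_num
  · rw [h0]
    congr 2
    push_cast
    omega

-- ===== VERDICT (by name: the statement is the Claim_ definition above) =====
theorem iterate2d_spec : Claim_equal_iterate2d := by
  intro xs ys xe ye _
  exact iterate2d_eq_alt xs ys xe ye
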